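-- pv_equiv track=rewrite | github.com/ddohler/tesseract-georgian | count_stuff/wordcounts.py | at_least_one_in_charset
-- ===== SOURCE A (Python) =====
-- def at_least_one_in_charset(must_chars, limit_chars, string):
--     """Returns true if all string's chars are in limit_chars and at least one is in must_chars"""
--     found_one = False
--     for c in string:
--         if c not in limit_chars:
--             return False
--         if c in must_chars:
--             found_one = True
--     return found_one
-- ===== SOURCE B (Python) =====
-- def at_least_one_in_charset(must_chars, limit_chars, string):
--     """Returns true if all string's chars are in limit_chars and at least one is in must_chars"""
--     return all(c in limit_chars for c in string) and any(c in must_chars for c in string)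
-- ===== Notes on version B (the rewrite author's own statement) =====
-- stated objective: idiomatic
-- what changed: Replaced the single fused flag-carrying loop (early return on a bad char, boolean flag for the must-set) with two independent short-circuiting passes via all()/any() generator expressions.
import Mathlib
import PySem

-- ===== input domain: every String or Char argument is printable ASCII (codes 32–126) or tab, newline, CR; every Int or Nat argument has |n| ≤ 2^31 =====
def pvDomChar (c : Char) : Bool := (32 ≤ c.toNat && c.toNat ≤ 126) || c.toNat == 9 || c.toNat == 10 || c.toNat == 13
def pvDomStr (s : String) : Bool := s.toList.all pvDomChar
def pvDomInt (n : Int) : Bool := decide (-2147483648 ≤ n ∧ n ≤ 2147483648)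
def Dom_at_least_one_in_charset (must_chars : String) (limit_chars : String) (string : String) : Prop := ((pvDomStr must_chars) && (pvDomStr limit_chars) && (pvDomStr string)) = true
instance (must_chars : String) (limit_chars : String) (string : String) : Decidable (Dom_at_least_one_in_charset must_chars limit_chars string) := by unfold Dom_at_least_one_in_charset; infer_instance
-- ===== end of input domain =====

-- ===== PORT A =====
-- B replaces A's fused flag-carrying loop with two independent short-circuiting passes (all/any); objective: idiomatic.
-- A's loop: early return False on a char outside limit_chars, else maintain found_one flag.
def pvLoopA (must limit : List Char) : List Char → Bool → Bool
  | [], found => found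
  | c :: cs, found =>
    if ¬ limit.contains c then false
    else pvLoopA must limit cs (if must.contains c then true else found)

def at_least_one_in_charset (must_chars : String) (limit_chars : String) (string : String) : Bool :=
  pvLoopA must_chars.toList limit_chars.toList string.toList false

-- ===== PORT B =====
def at_least_one_in_charset_alt (must_chars : String) (limit_chars : String) (string : String) : Bool :=
  (string.toList.all (fun c => limit_chars.toList.contains c)) &&
  (string.toList.any (fun c => must_chars.toList.contains c))

-- ===== PRECONDITION & SPEC =====
def Spec_at_least_one_in_charset (must_chars : String) (limit_chars : String) (string : String) (out : Bool) : Prop := out = at_least_one_in_charset_alt must_chars limit_chars string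
instance (must_chars : String) (limit_chars : String) (string : String) (out : Bool) : Decidable (Spec_at_least_one_in_charset must_chars limit_chars string out) := by unfold Spec_at_least_one_in_charset; infer_instance

-- ===== CLAIM (what is proved, stated in full; the proofs are below) =====
def Claim_equal_at_least_one_in_charset : Prop := ∀ (must_chars : String) (limit_chars : String) (string : String), Dom_at_least_one_in_charset must_chars limit_chars string → Spec_at_least_one_in_charset must_chars limit_chars string (at_least_one_in_charset must_chars limit_chars string)

-- ===== LEMMAS AND PROOFS =====

-- ===== VERDICT (by name: the statement is the Claim_ definition above) =====
theorem pvLoopA_eq (must limit : List Char) :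
    ∀ (cs : List Char) (found : Bool),
      pvLoopA must limit cs found
        = ((cs.all (fun c => limit.contains c)) && (found || cs.any (fun c => must.contains c)))
  | [], found => by simp [pvLoopA]
  | c :: cs, found => by
    simp only [pvLoopA, List.all_cons, List.any_cons]
    by_cases hl : c ∈ limit
    · rw [if_neg (by simp [hl])]
      rw [pvLoopA_eq must limit cs]
      by_cases hm : c ∈ must <;> cases found <;> simp [hl, hm]
    · rw [if_pos (by simp [hl])]
      simp [hl]

theorem at_least_one_in_charset_spec : Claim_equal_at_least_one_in_charset := by
  intro m l s _
  unfold Spec_at_least_one_in_charset at_least_one_in_charset at_least_one_in_charset_alt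
  rw [pvLoopA_eq]
  simp
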